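-- pv_equiv track=rewrite | github.com/helloerikaaa/AnalisisAlgoritmos2024 | I/U1_E121_ModeloRAM.py | buscar_matriz
-- ===== SOURCE A (Python) =====
-- def buscar_matriz(matriz:list[list], numero: int) -> int:
--     n_pasos = 0
--     for i in range(len(matriz)):
--         for j in range(len(matriz[i])):
--             n_pasos += 1
--             if matriz[i][j] == numero:
--                 return n_pasos
--     return -1
-- ===== SOURCE B (Python) =====
-- def buscar_matriz(matriz: list[list], numero: int) -> int:
--     # Recursive on the rows: solve the suffix first, then shift its answer
--     # by the head row's length (back-to-front offsetting).
--     if not matriz: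
--         return -1
--     head, rest = matriz[0], matriz[1:]
--     try:
--         return head.index(numero) + 1
--     except ValueError:
--         pass
--     tail = buscar_matriz(rest, numero)
--     return tail if tail == -1 else tail + len(head)
-- ===== Notes on version B (the rewrite author's own statement) =====
-- stated objective: alternative
-- what changed: B recurses on the list of rows and shifts the suffix's answer upward by the head row's length after the recursive call returns (back-to-front offsetting), instead of A's nested index loops threading a forward per-element step counter.
import Mathlib
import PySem

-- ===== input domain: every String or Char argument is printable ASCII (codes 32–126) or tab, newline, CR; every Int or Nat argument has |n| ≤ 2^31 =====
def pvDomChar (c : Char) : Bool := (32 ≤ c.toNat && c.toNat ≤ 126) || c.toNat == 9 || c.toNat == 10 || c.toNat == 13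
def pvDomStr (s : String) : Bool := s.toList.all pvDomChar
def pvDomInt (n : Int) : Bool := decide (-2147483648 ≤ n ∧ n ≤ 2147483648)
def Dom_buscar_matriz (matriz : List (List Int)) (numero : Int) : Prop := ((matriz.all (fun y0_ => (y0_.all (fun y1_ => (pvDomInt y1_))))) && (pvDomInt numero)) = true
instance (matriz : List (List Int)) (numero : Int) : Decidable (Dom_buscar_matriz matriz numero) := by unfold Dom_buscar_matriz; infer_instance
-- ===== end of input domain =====

-- B recurses on the rows and shifts the suffix's answer by the head row's length after the recursive call (back-to-front offsetting), instead of A's forward per-element counter; same result.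
-- ===== PORT A =====
-- inner loop over one row: returns (updated n_pasos, some result | none)
def pvARow (row : List Int) (numero : Int) (n : Int) : Int × Option Int :=
  match row with
  | [] => (n, none)
  | x :: xs => if x == numero then (n + 1, some (n + 1)) else pvARow xs numero (n + 1)

def pvAGo (rows : List (List Int)) (numero : Int) (n : Int) : Int :=
  match rows with
  | [] => -1
  | r :: rs =>
    match pvARow r numero n with
    | (_, some p) => p
    | (n', none) => pvAGo rs numero n'

def buscar_matriz (matriz : List (List Int)) (numero : Int) : Int :=
  pvAGo matriz numero 0

-- ===== PORT B =====
def buscar_matriz_alt (matriz : List (List Int)) (numero : Int) : Int :=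
  match matriz with
  | [] => -1
  | head :: rest =>
    match PySem.List.index? head numero with
    | some i => (i : Int) + 1
    | none =>
      let tail := buscar_matriz_alt rest numero
      if tail == -1 then tail else tail + (head.length : Int)

-- ===== PRECONDITION & SPEC =====
def Spec_buscar_matriz (matriz : List (List Int)) (numero : Int) (out : Int) : Prop := out = buscar_matriz_alt matriz numero
instance (matriz : List (List Int)) (numero : Int) (out : Int) : Decidable (Spec_buscar_matriz matriz numero out) := by unfold Spec_buscar_matriz; infer_instance

-- ===== CLAIM =====
def Claim_equal_buscar_matriz : Prop := ∀ (matriz : List (List Int)) (numero : Int), Dom_buscar_matriz matriz numero → Spec_buscar_matriz matriz numero (buscar_matriz matriz numero)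

-- ===== LEMMAS AND PROOFS =====
theorem pvARow_eq (row : List Int) (numero : Int) (n : Int) :
    pvARow row numero n =
      match PySem.List.index? row numero with
      | some i => (n + (i : Int) + 1, some (n + (i : Int) + 1))
      | none => (n + (row.length : Int), none) := by
  induction row generalizing n with
  | nil => simp [pvARow, PySem.List.index?]
  | cons x xs ih =>
    by_cases hx : x = numero
    · subst hx
      rw [pvARow, if_pos (by simp), PySem.List.index?_cons_self]
      simp
    · have hne : x ≠ numero := hx
      have hb : ¬ (x == numero) = true := by simpa using hne
      rw [pvARow, if_neg hb, ih, PySem.List.index?_cons_of_ne xs hne]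
      cases h : PySem.List.index? xs numero with
      | none => simp; ring
      | some i => simp; ring_nf

theorem alt_pos_or_neg (rows : List (List Int)) (numero : Int) :
    buscar_matriz_alt rows numero = -1 ∨ 1 ≤ buscar_matriz_alt rows numero := by
  induction rows with
  | nil => left; rfl
  | cons r rs ih =>
    rw [buscar_matriz_alt]
    cases h : PySem.List.index? r numero with
    | some i => right; simp
    | none =>
      simp only []
      rcases ih with h1 | h1
      · left; simp [h1]
      · right
        have hne : ¬ (buscar_matriz_alt rs numero == -1) = true := by
          simp; omega
        simp [hne]; omega

theorem pvGo_eq (rows : List (List Int)) (numero : Int) (n : Int) :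
    pvAGo rows numero n =
      (if buscar_matriz_alt rows numero = -1 then -1 else n + buscar_matriz_alt rows numero) := by
  induction rows generalizing n with
  | nil => simp [pvAGo, buscar_matriz_alt]
  | cons r rs ih =>
    rw [pvAGo, pvARow_eq, buscar_matriz_alt]
    cases h : PySem.List.index? r numero with
    | some i =>
      have : ((i : Int) + 1) ≠ -1 := by omega
      simp [this]; ring
    | none =>
      simp only []
      rcases alt_pos_or_neg rs numero with h1 | h1
      · simp [ih, h1]
      · have hne : buscar_matriz_alt rs numero ≠ -1 := by omega
        have hne2 : buscar_matriz_alt rs numero + (r.length : Int) ≠ -1 := by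
          have : (0:Int) ≤ (r.length : Int) := by positivity
          omega
        simp [ih, hne, hne2]; ring

-- ===== VERDICT =====
theorem buscar_matriz_spec : Claim_equal_buscar_matriz := by
  intro matriz numero _
  unfold Spec_buscar_matriz buscar_matriz
  rw [pvGo_eq]
  rcases alt_pos_or_neg matriz numero with h | h
  · simp [h]
  · have : buscar_matriz_alt matriz numero ≠ -1 := by omega
    simp [this]
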